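-- pv_equiv track=rewrite | github.com/stepanplaunov/BMSTU | Formal Language Theory/lab1/task2/confluence.py | check_prefix
-- ===== SOURCE A (Python) =====
-- def check_prefix(left, right):
--     string = left + right
--     n = len(string)
--     prefix = [0] * n
--     for i in range(1, n):
--         j = prefix[i - 1]
--         while j > 0 and string[i] != string[j]:
--             j = prefix[j - 1]
--         if string[i] == string[j]:
--             j += 1
--         prefix[i] = j
--     if prefix[-1] > 0:
--         return False
--     else:
--         return True
-- ===== SOURCE B (Python) =====
-- def check_prefix(left, right):
--     s = left + right
--     n = len(s)
--     for k in range(1, n):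
--         if s[:k] == s[-k:]:
--             return False
--     return True
-- ===== Notes on version B (the rewrite author's own statement) =====
-- stated objective: simpler
-- what changed: Instead of building the full KMP prefix-function table and testing its last entry, B directly scans border lengths k=1..n-1 and compares the length-k prefix with the length-k suffix.
import Mathlib
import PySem

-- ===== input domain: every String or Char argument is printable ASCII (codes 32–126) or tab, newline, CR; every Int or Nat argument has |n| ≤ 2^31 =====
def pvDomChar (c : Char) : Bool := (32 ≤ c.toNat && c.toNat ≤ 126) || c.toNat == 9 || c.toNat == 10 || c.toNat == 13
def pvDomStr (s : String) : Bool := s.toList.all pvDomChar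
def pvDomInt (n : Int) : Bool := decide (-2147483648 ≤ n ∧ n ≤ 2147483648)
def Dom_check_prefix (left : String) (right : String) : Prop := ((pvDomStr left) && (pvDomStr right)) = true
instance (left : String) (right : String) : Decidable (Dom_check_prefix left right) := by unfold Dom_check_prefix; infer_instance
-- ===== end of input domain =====

-- B replaces A's incremental KMP prefix-function table by a direct scan of candidate
-- border lengths k = 1..n-1, comparing the length-k prefix with the length-k suffix
-- (objective: simpler; not faster).


-- ===== PORT A =====
-- A's inner `while j > 0 and string[i] != string[j]: j = prefix[j - 1]`.
-- `fuel` only makes the recursion structurally terminating: on every state the loop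
-- actually reaches, j strictly decreases, so fuel = n always suffices (proved below).
-- All Python index accesses here are in range on reached states, so `getD` is exact.
def pvAWhile (s : List Char) (p : List Nat) (i : Nat) : Nat → Nat → Nat
  | 0, j => j
  | fuel + 1, j =>
    if 0 < j ∧ s.getD i ' ' ≠ s.getD j ' ' then pvAWhile s p i fuel (p.getD (j - 1) 0)
    else j

-- A's outer `for i in range(1, n)`, writing prefix[i] in place.
def pvAGo (s : List Char) (n : Nat) (p : List Nat) (i : Nat) : List Nat :=
  if h : i < n then
    let j0 := p.getD (i - 1) 0
    let j1 := pvAWhile s p i n j0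
    let j2 := if s.getD i ' ' = s.getD j1 ' ' then j1 + 1 else j1
    pvAGo s n (p.set i j2) (i + 1)
  else p
termination_by n - i

def check_prefix (left : String) (right : String) : Bool :=
  let s := (left ++ right).toList
  let n := s.length
  let pre := pvAGo s n (List.replicate n 0) 1
  -- prefix[-1]: Python raises IndexError when n = 0; excluded by Pre_check_prefix
  if 0 < pre.getD (n - 1) 0 then false else true

-- ===== PORT B =====
-- B's `for k in range(1, n): if s[:k] == s[-k:]: return False`; for 1 ≤ k < n the
-- Python slices s[:k] and s[-k:] are exactly take k and drop (n - k).
def pvBGo (s : List Char) (n : Nat) (k : Nat) : Bool :=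
  if h : k < n then
    if s.take k = s.drop (n - k) then false else pvBGo s n (k + 1)
  else true
termination_by n - k

def check_prefix_alt (left : String) (right : String) : Bool :=
  let s := (left ++ right).toList
  pvBGo s s.length 1

-- ===== PRECONDITION & SPEC =====
-- Pre_ excludes only the empty concatenation, on which A raises IndexError (prefix[-1] on []).
def Pre_check_prefix (left : String) (right : String) : Prop := left ++ right ≠ ""
instance (left : String) (right : String) : Decidable (Pre_check_prefix left right) := by
  unfold Pre_check_prefix; infer_instance

def pvWitness_check_prefix : String × String := ("ab", "a")

def Spec_check_prefix (left : String) (right : String) (out : Bool) : Prop := out = check_prefix_alt left right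
instance (left : String) (right : String) (out : Bool) : Decidable (Spec_check_prefix left right out) := by unfold Spec_check_prefix; infer_instance

-- ===== CLAIM (what is proved, stated in full; the proofs are below) =====
def Claim_equal_check_prefix : Prop := ∀ (left : String) (right : String), Dom_check_prefix left right → Pre_check_prefix left right → Spec_check_prefix left right (check_prefix left right)

-- ===== LEMMAS AND PROOFS =====

-- `pvPf t` is the length of the longest proper border of t (the KMP prefix-function
-- value of the full string t).
def pvPf (t : List Char) : Nat :=
  Nat.findGreatest (fun k => t.take k = t.drop (t.length - k)) (t.length - 1)

lemma pvP0 (t : List Char) : t.take 0 = t.drop (t.length - 0) := by simp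

lemma pvPf_border (t : List Char) :
    pvPf t ≤ t.length - 1 ∧ t.take (pvPf t) = t.drop (t.length - pvPf t) := by
  refine ⟨Nat.findGreatest_le _, ?_⟩
  exact Nat.findGreatest_spec (P := fun k => t.take k = t.drop (t.length - k)) (Nat.zero_le _) (pvP0 t)

lemma pvPf_max (t : List Char) (k : Nat) (hk : k ≤ t.length - 1)
    (h : t.take k = t.drop (t.length - k)) : k ≤ pvPf t :=
  Nat.le_findGreatest hk h

lemma pvChain (t : List Char) (j b : Nat) (hj1 : j ≤ t.length)
    (hj2 : t.take j = t.drop (t.length - j)) (hb : b ≤ j) :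
    (t.take b = t.drop (t.length - b)) ↔
      ((t.take j).take b = (t.take j).drop ((t.take j).length - b)) := by
  have hlen : (t.take j).length = j := by simp [List.length_take]; omega
  rw [hlen, List.take_take, Nat.min_eq_left hb, hj2, List.drop_drop]
  have harith : t.length - j + (j - b) = t.length - b := by omega
  rw [harith]

lemma pvExt (t : List Char) (c : Char) (k : Nat) (hk : k ≤ t.length) :
    ((t ++ [c]).take (k + 1) = (t ++ [c]).drop ((t ++ [c]).length - (k + 1))) ↔
      (t.take k = t.drop (t.length - k) ∧ (t ++ [c]).getD k ' ' = c) := by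
  have hkl : k < (t ++ [c]).length := by simp; omega
  have hget : (t ++ [c]).getD k ' ' = (t ++ [c])[k] := List.getD_eq_getElem _ _ hkl
  have htake : (t ++ [c]).take (k + 1) = t.take k ++ [(t ++ [c])[k]] := by
    rw [List.take_add_one, List.take_append_of_le_length hk, List.getElem?_eq_getElem hkl]
    rfl
  have hdroplen : (t ++ [c]).length - (k + 1) = t.length - k := by simp
  have hdrop : (t ++ [c]).drop ((t ++ [c]).length - (k + 1)) = t.drop (t.length - k) ++ [c] := by
    rw [hdroplen, List.drop_append_of_le_length (by omega)]
  rw [htake, hdrop, hget]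
  constructor
  · intro h
    have := List.concat_inj.mp (by simpa [List.concat] using h)
    exact ⟨this.1, this.2⟩
  · intro ⟨h1, h2⟩; simp [h1, h2]

lemma pvGetD_take (s : List Char) (i j : Nat) (h : j < i) (d : Char) :
    (s.take i).getD j d = s.getD j d := by
  simp [List.getD_eq_getElem?_getD, h]

lemma pvGetD_append (t : List Char) (c : Char) (k : Nat) (h : k < t.length) (d : Char) :
    (t ++ [c]).getD k d = t.getD k d := by
  simp [List.getD_eq_getElem?_getD, List.getElem?_append, h]


lemma pvTake_succ (s : List Char) (i : Nat) (h : i < s.length) :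
    s.take (i + 1) = s.take i ++ [s.getD i ' '] := by
  rw [List.take_add_one, List.getElem?_eq_getElem h, List.getD_eq_getElem _ _ h]
  rfl

-- Invariant of A's inner while loop: j stays a border length of t = s.take i, stays an
-- upper bound for every b with b+1 a border of s.take (i+1), and at exit the loop
-- condition fails.
lemma pvWhileLem (s : List Char) (p : List Nat) (i : Nat) (hi : i < s.length) (_hi1 : 1 ≤ i)
    (Hp : ∀ k, k < i → p.getD k 0 = pvPf (s.take (k + 1))) :
    ∀ fuel j, j ≤ fuel → j < i →
      ((s.take i).take j = (s.take i).drop ((s.take i).length - j)) →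
      (∀ b, b < i →
        ((s.take (i+1)).take (b+1) = (s.take (i+1)).drop ((s.take (i+1)).length - (b+1))) →
        b ≤ j) →
      (pvAWhile s p i fuel j < i ∧
       ((s.take i).take (pvAWhile s p i fuel j) =
         (s.take i).drop ((s.take i).length - pvAWhile s p i fuel j)) ∧
       (∀ b, b < i →
         ((s.take (i+1)).take (b+1) = (s.take (i+1)).drop ((s.take (i+1)).length - (b+1))) →
         b ≤ pvAWhile s p i fuel j) ∧
       ¬(0 < pvAWhile s p i fuel j ∧
          s.getD i ' ' ≠ s.getD (pvAWhile s p i fuel j) ' ')) := by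
  have hti : (s.take i).length = i := by simp; omega
  intro fuel
  induction fuel with
  | zero =>
    intro j hj hji hbrd hinv
    have hj0 : j = 0 := Nat.le_zero.mp hj
    subst hj0
    refine ⟨hji, hbrd, hinv, ?_⟩
    simp [pvAWhile]
  | succ fuel ih =>
    intro j hj hji hbrd hinv
    rw [pvAWhile]
    by_cases hc : 0 < j ∧ s.getD i ' ' ≠ s.getD j ' '
    · rw [if_pos hc]
      have hp : p.getD (j - 1) 0 = pvPf (s.take j) := by
        have h := Hp (j - 1) (by omega)
        rwa [Nat.sub_add_cancel hc.1] at h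
      have ht'len : (s.take j).length = j := by simp; omega
      have hpfb := pvPf_border (s.take j)
      have hpflt : pvPf (s.take j) < j := by
        have h := hpfb.1; rw [ht'len] at h; omega
      have httj : (s.take i).take j = s.take j := by
        rw [List.take_take, Nat.min_eq_left (le_of_lt hji)]
      have hchain : ∀ b, b ≤ j →
          (((s.take i).take b = (s.take i).drop ((s.take i).length - b)) ↔
            ((s.take j).take b = (s.take j).drop ((s.take j).length - b))) := by
        intro b hb
        have h := pvChain (s.take i) j b (by omega) hbrd hb
        rwa [httj] at h
      have hb2 : (s.take i).take (pvPf (s.take j)) =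
          (s.take i).drop ((s.take i).length - pvPf (s.take j)) :=
        (hchain (pvPf (s.take j)) (le_of_lt hpflt)).mpr hpfb.2
      have hinv2 : ∀ b, b < i →
          ((s.take (i+1)).take (b+1) = (s.take (i+1)).drop ((s.take (i+1)).length - (b+1))) →
          b ≤ pvPf (s.take j) := by
        intro b hbi hub
        have hbj := hinv b hbi hub
        have hub' := hub
        rw [pvTake_succ s i hi] at hub'
        have hext := (pvExt (s.take i) (s.getD i ' ') b (by omega)).mp hub'
        have hbne : b ≠ j := by
          intro he
          subst he
          have hgd : (s.take i).getD b ' ' = s.getD i ' ' := by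
            rw [← pvGetD_append (s.take i) (s.getD i ' ') b (by omega) ' ']
            exact hext.2
          rw [pvGetD_take s i b hbi ' '] at hgd
          exact hc.2 hgd.symm
        have hblt : b < j := by omega
        have hbt' : (s.take j).take b = (s.take j).drop ((s.take j).length - b) :=
          (hchain b (by omega)).mp hext.1
        exact pvPf_max (s.take j) b (by omega) hbt'
      rw [hp]
      exact ih (pvPf (s.take j)) (by omega) (by omega) hb2 hinv2
    · rw [if_neg hc]
      exact ⟨hji, hbrd, hinv, hc⟩

-- One step of A's outer loop computes exactly pvPf (s.take (i+1)).
lemma pvStepLem (s : List Char) (p : List Nat) (i : Nat) (hi : i < s.length) (hi1 : 1 ≤ i)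
    (Hp : ∀ k, k < i → p.getD k 0 = pvPf (s.take (k + 1))) :
    (if s.getD i ' ' = s.getD (pvAWhile s p i s.length (p.getD (i - 1) 0)) ' '
     then pvAWhile s p i s.length (p.getD (i - 1) 0) + 1
     else pvAWhile s p i s.length (p.getD (i - 1) 0)) = pvPf (s.take (i + 1)) := by
  have hti : (s.take i).length = i := by simp; omega
  have hulen : (s.take (i+1)).length = i + 1 := by simp; omega
  have hj0 : p.getD (i - 1) 0 = pvPf (s.take i) := by
    have h := Hp (i - 1) (by omega)
    rwa [Nat.sub_add_cancel hi1] at h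
  have hpfb := pvPf_border (s.take i)
  have hjlt : pvPf (s.take i) < i := by
    have h := hpfb.1; rw [hti] at h; omega
  have hinit : ∀ b, b < i →
      ((s.take (i+1)).take (b+1) = (s.take (i+1)).drop ((s.take (i+1)).length - (b+1))) →
      b ≤ p.getD (i - 1) 0 := by
    intro b hbi hub
    rw [pvTake_succ s i hi] at hub
    have hext := (pvExt (s.take i) (s.getD i ' ') b (by omega)).mp hub
    rw [hj0]
    exact pvPf_max (s.take i) b (by omega) hext.1
  obtain ⟨h1, h2, h3, h4⟩ :=
    pvWhileLem s p i hi hi1 Hp s.length (p.getD (i - 1) 0)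
      (by rw [hj0]; omega) (by rw [hj0]; exact hjlt) (by rw [hj0]; exact hpfb.2) hinit
  set j' := pvAWhile s p i s.length (p.getD (i - 1) 0) with hj'
  have hub := pvPf_border (s.take (i+1))
  have hule : pvPf (s.take (i+1)) ≤ i := by
    have h := hub.1; rw [hulen] at h; omega
  split_ifs with hmatch
  · -- the final characters match: result is j' + 1
    have hgd : (s.take i ++ [s.getD i ' ']).getD j' ' ' = s.getD i ' ' := by
      rw [pvGetD_append (s.take i) (s.getD i ' ') j' (by omega) ' ',
        pvGetD_take s i j' h1 ' ']
      exact hmatch.symm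
    have hbord : (s.take (i+1)).take (j'+1) =
        (s.take (i+1)).drop ((s.take (i+1)).length - (j'+1)) := by
      rw [pvTake_succ s i hi]
      exact (pvExt (s.take i) (s.getD i ' ') j' (by omega)).mpr ⟨h2, hgd⟩
    have hge : j' + 1 ≤ pvPf (s.take (i+1)) :=
      pvPf_max (s.take (i+1)) (j'+1) (by omega) hbord
    have hle : pvPf (s.take (i+1)) ≤ j' + 1 := by
      rcases hpf : pvPf (s.take (i+1)) with _ | b
      · omega
      · have hb := hub.2
        rw [hpf] at hb
        have := h3 b (by omega) hb
        omega
    omega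
  · -- mismatch at exit: j' = 0 and there is no border at all
    have hz : j' = 0 := by
      by_contra hnz
      exact h4 ⟨by omega, hmatch⟩
    rcases hpf : pvPf (s.take (i+1)) with _ | b
    · omega
    · exfalso
      have hb := hub.2
      rw [hpf] at hb
      have hb0 : b = 0 := by have := h3 b (by omega) hb; omega
      subst hb0
      rw [pvTake_succ s i hi] at hb
      have hext := (pvExt (s.take i) (s.getD i ' ') 0 (by omega)).mp hb
      have hgd : s.getD 0 ' ' = s.getD i ' ' := by
        rw [← pvGetD_take s i 0 (by omega) ' ',
          ← pvGetD_append (s.take i) (s.getD i ' ') 0 (by omega) ' ']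
        exact hext.2
      rw [hz] at hmatch
      exact hmatch hgd.symm

lemma pvGoLem (s : List Char) (i : Nat) (p : List Nat) (h1 : 1 ≤ i)
    (hlen : p.length = s.length)
    (Hp : ∀ k, k < i → p.getD k 0 = pvPf (s.take (k + 1))) :
    ∀ k, k < s.length → (pvAGo s s.length p i).getD k 0 = pvPf (s.take (k + 1)) := by
  intro k hk
  rw [pvAGo]
  by_cases h : i < s.length
  · rw [dif_pos h]
    have hstep := pvStepLem s p i h h1 Hp
    refine pvGoLem s (i + 1)
      (p.set i (if s.getD i ' ' = s.getD (pvAWhile s p i s.length (p.getD (i - 1) 0)) ' '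
        then pvAWhile s p i s.length (p.getD (i - 1) 0) + 1
        else pvAWhile s p i s.length (p.getD (i - 1) 0)))
      (by omega) (by simp [hlen]) ?_ k hk
    intro k' hk'
    by_cases hki : k' = i
    · subst hki
      rw [List.getD_eq_getElem?_getD, List.getElem?_set_self (by omega)]
      exact hstep
    · rw [List.getD_eq_getElem?_getD, List.getElem?_set_ne (fun he => hki he.symm),
        ← List.getD_eq_getElem?_getD]
      exact Hp k' (by omega)
  · rw [dif_neg h]
    exact Hp k (by omega)
termination_by s.length - i

lemma pvBGoLem (s : List Char) (n : Nat) (k : Nat) :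
    pvBGo s n k = true ↔ ∀ m, k ≤ m → m < n → ¬(s.take m = s.drop (n - m)) := by
  rw [pvBGo]
  by_cases h : k < n
  · rw [dif_pos h]
    by_cases he : s.take k = s.drop (n - k)
    · rw [if_pos he]
      simp only [Bool.false_eq_true, false_iff, not_forall]
      exact ⟨k, le_refl k, h, fun hne => hne he⟩
    · rw [if_neg he]
      rw [pvBGoLem s n (k + 1)]
      constructor
      · intro hall m hm1 hm2 hme
        rcases Nat.eq_or_lt_of_le hm1 with hkm | hkm
        · exact he (hkm ▸ hme)
        · exact hall m hkm hm2 hme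
      · intro hall m hm1 hm2
        exact hall m (by omega) hm2
  · rw [dif_neg h]
    simp only [true_iff]
    intro m hm1 hm2
    omega
termination_by n - k

lemma pvPf_pos_iff (s : List Char) :
    0 < pvPf s ↔ ∃ m, 1 ≤ m ∧ m < s.length ∧ s.take m = s.drop (s.length - m) := by
  constructor
  · intro h
    have hb := pvPf_border s
    exact ⟨pvPf s, h, by omega, hb.2⟩
  · rintro ⟨m, hm1, hm2, hm3⟩
    have := pvPf_max s m (by omega) hm3
    omega

-- ===== VERDICT (by name: the statement is the Claim_ definition above) =====
theorem check_prefix_spec : Claim_equal_check_prefix := by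
  intro left right _ hpre
  unfold Spec_check_prefix
  have hne : (left ++ right).toList ≠ [] := by
    intro h
    exact hpre (String.toList_eq_nil_iff.mp h)
  have hlen1 : 1 ≤ (left ++ right).toList.length := List.length_pos_iff.mpr hne
  have hA : check_prefix left right =
      (if 0 < pvPf (left ++ right).toList then false else true) := by
    rw [check_prefix]
    have hHp : ∀ k, k < 1 →
        (List.replicate (left ++ right).toList.length 0).getD k 0 =
          pvPf ((left ++ right).toList.take (k + 1)) := by
      intro k hk
      have hk0 : k = 0 := by omega
      subst hk0
      have hl : ((left ++ right).toList.take 1).length - 1 = 0 := by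
        simp [List.length_take]
      rw [List.getD_replicate _ (by omega), pvPf, hl, Nat.findGreatest_zero]
    have hT := pvGoLem (left ++ right).toList 1
      (List.replicate (left ++ right).toList.length 0) le_rfl (by simp) hHp
      ((left ++ right).toList.length - 1) (by omega)
    have harr : (left ++ right).toList.length - 1 + 1 = (left ++ right).toList.length := by omega
    rw [harr, List.take_length] at hT
    rw [hT]
  have hB : check_prefix_alt left right =
      (if 0 < pvPf (left ++ right).toList then false else true) := by
    rw [check_prefix_alt]
    split_ifs with h
    · obtain ⟨m, hm1, hm2, hm3⟩ := (pvPf_pos_iff (left ++ right).toList).mp h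
      cases hgo : pvBGo (left ++ right).toList (left ++ right).toList.length 1
      · rfl
      · exact absurd hm3
          (((pvBGoLem (left ++ right).toList (left ++ right).toList.length 1).mp hgo) m hm1 hm2)
    · exact (pvBGoLem (left ++ right).toList (left ++ right).toList.length 1).mpr
        (fun m hm1 hm2 hm3 => h ((pvPf_pos_iff (left ++ right).toList).mpr ⟨m, hm1, hm2, hm3⟩))
  rw [hA, hB]
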